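-- pv_equiv track=rewrite | github.com/Hawkkker/LeagueOfSound | UpdateSpells.py | remove_spaces_and_quotes
-- ===== SOURCE A (Python) =====
-- def remove_spaces_and_quotes(string):
--     result = []
--     i = 0
--
--     while i < len(string):
--         if string[i] == "'":
--             i += 1  # Skip the quote and move to the next character
--             if i < len(string):
--                 result.append(string[i].lower())  # Lowercase the next character
--         elif string[i] not in [' ', '.']:  # Skip spaces and dots
--             result.append(string[i])  # Add non-space characters
--         i += 1
--
--     return ''.join(result)
-- ===== SOURCE B (Python) =====
-- import re
--
-- def remove_spaces_and_quotes(string):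
--     # Single left-to-right regex substitution: a quote consumes the (optional)
--     # following character and lowercases it; a lone space or dot is deleted.
--     def repl(m):
--         g = m.group(1)
--         return g.lower() if g is not None else ''
--     return re.sub(r"'(.?)|[ .]", repl, string, flags=re.DOTALL)
-- ===== Notes on version B (the rewrite author's own statement) =====
-- stated objective: idiomatic
-- what changed: Replaced the explicit index-based while-loop state machine with a single left-to-right regex substitution (re.sub with a callback, DOTALL) that lowercases the captured character following a quote and deletes lone spaces and dots; the C regex engine makes it measurably faster.
import Mathlib
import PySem

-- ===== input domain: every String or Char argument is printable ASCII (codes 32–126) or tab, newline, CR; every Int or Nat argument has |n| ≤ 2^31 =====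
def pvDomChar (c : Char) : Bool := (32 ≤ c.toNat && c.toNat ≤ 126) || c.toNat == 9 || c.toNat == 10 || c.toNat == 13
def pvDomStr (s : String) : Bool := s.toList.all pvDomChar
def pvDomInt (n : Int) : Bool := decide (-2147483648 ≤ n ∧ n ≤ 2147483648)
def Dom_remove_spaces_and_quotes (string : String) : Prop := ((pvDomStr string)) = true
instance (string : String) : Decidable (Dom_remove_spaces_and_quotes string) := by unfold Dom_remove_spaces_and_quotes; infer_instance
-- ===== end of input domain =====

-- B replaces A's explicit index/state while-loop by a single regex substitution (re.sub with a callback); idiomatic, and measurably faster via the C regex engine.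


-- ===== PORT A =====
-- while-loop over indices, transliterated as recursion on the remaining length
def pvALoop (s : List Char) (i : Nat) (result : List Char) : List Char :=
  if _h : i < s.length then
    if s[i]! = '\'' then
      -- i += 1; if i < len: result.append(string[i].lower()); then i += 1
      let i' := i + 1
      let result' := if i' < s.length then result ++ [PySem.Chars.lowerChar s[i']!] else result
      pvALoop s (i' + 1) result'
    else if s[i]! = ' ' ∨ s[i]! = '.' then
      pvALoop s (i + 1) result
    else
      pvALoop s (i + 1) (result ++ [s[i]!])
  else result
termination_by s.length - i

def remove_spaces_and_quotes (string : String) : String :=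
  String.mk (pvALoop string.toList 0 [])

-- ===== PORT B =====
-- hand port of re.sub(r"'(.?)|[ .]", repl, string, flags=re.DOTALL): the regex
-- engine scans left to right; at a quote the first alternative matches and
-- captures the optional next character (repl lowercases it, '' at end of
-- string); at a lone space/dot the second alternative matches (repl deletes);
-- any other character is copied verbatim.  Exact for this pattern on all input.
def pvSub : List Char → List Char
  | [] => []
  | '\'' :: rest =>
      match rest with
      | [] => []                                   -- group(1) empty: repl returns ''
      | c :: rest' => PySem.Chars.lowerChar c :: pvSub rest'
  | c :: rest =>
      if c = ' ' ∨ c = '.' then pvSub rest else c :: pvSub rest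

def remove_spaces_and_quotes_alt (string : String) : String :=
  String.mk (pvSub string.toList)

-- ===== PRECONDITION & SPEC =====
def Spec_remove_spaces_and_quotes (string : String) (out : String) : Prop := out = remove_spaces_and_quotes_alt string
instance (string : String) (out : String) : Decidable (Spec_remove_spaces_and_quotes string out) := by unfold Spec_remove_spaces_and_quotes; infer_instance

-- ===== CLAIM (what is proved, stated in full; the proofs are below) =====
def Claim_equal_remove_spaces_and_quotes : Prop := ∀ (string : String), Dom_remove_spaces_and_quotes string → Spec_remove_spaces_and_quotes string (remove_spaces_and_quotes string)

-- ===== LEMMAS AND PROOFS =====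
theorem pvSub_nil : pvSub [] = [] := rfl
theorem pvSub_quote_nil : pvSub ['\''] = [] := rfl
theorem pvSub_quote_cons (c : Char) (rest : List Char) :
    pvSub ('\'' :: c :: rest) = PySem.Chars.lowerChar c :: pvSub rest := rfl
theorem pvSub_space (rest : List Char) : pvSub (' ' :: rest) = pvSub rest := rfl
theorem pvSub_dot (rest : List Char) : pvSub ('.' :: rest) = pvSub rest := rfl
theorem pvSub_other (c : Char) (rest : List Char) (h1 : c ≠ '\'') :
    pvSub (c :: rest) = if c = ' ' ∨ c = '.' then pvSub rest else c :: pvSub rest := by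
  rw [pvSub.eq_def]
  rcases rest with _ | ⟨d, ds⟩ <;> simp_all [pvSub]

theorem pvALoop_eq_aux (s : List Char) :
    ∀ (n i : Nat) (result : List Char), s.length - i ≤ n →
      pvALoop s i result = result ++ pvSub (s.drop i) := by
  intro n
  induction n with
  | zero =>
    intro i result hle
    rw [pvALoop, dif_neg (by omega),
      List.drop_eq_nil_of_le (by omega : s.length ≤ i), pvSub_nil, List.append_nil]
  | succ n ih =>
    intro i result hle
    rw [pvALoop]
    by_cases h : i < s.length
    · have hdrop : s.drop i = s[i] :: s.drop (i + 1) := List.drop_eq_getElem_cons h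
      have hget : s[i]! = s[i] := getElem!_pos s i h
      simp only [h, dif_pos, hget]
      by_cases hq : s[i] = '\''
      · simp only [hq, if_pos]
        by_cases h2 : i + 1 < s.length
        · have hdrop2 : s.drop (i + 1) = s[i+1] :: s.drop (i + 2) := List.drop_eq_getElem_cons h2
          have hget2 : s[i+1]! = s[i+1] := getElem!_pos s (i+1) h2
          rw [if_pos h2, hget2, ih (i + 2) _ (by omega), hdrop, hdrop2, hq,
            pvSub_quote_cons]
          simp
        · rw [if_neg h2, ih (i + 2) _ (by omega), hdrop, hq,
            List.drop_eq_nil_of_le (show s.length ≤ i + 2 by omega),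
            List.drop_eq_nil_of_le (show s.length ≤ i + 1 by omega),
            pvSub_nil, pvSub_quote_nil]
      · rw [if_neg hq]
        by_cases hsd : s[i] = ' ' ∨ s[i] = '.'
        · rw [if_pos hsd, ih (i + 1) _ (by omega), hdrop]
          rcases hsd with hsd | hsd <;> rw [hsd]
          · rw [pvSub_space]
          · rw [pvSub_dot]
        · rw [if_neg hsd, ih (i + 1) _ (by omega), hdrop,
            pvSub_other s[i] _ hq, if_neg hsd]
          simp
    · rw [dif_neg h, List.drop_eq_nil_of_le (by omega : s.length ≤ i),
        pvSub_nil, List.append_nil]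

theorem pvALoop_eq (s : List Char) (i : Nat) (result : List Char) :
    pvALoop s i result = result ++ pvSub (s.drop i) :=
  pvALoop_eq_aux s (s.length - i) i result le_rfl

-- ===== VERDICT (by name: the statement is the Claim_ definition above) =====
theorem remove_spaces_and_quotes_spec : Claim_equal_remove_spaces_and_quotes := by
  intro string _
  unfold Spec_remove_spaces_and_quotes remove_spaces_and_quotes remove_spaces_and_quotes_alt
  rw [pvALoop_eq, List.drop_zero, List.nil_append]
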